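-- pv_equiv track=rewrite | github.com/DANR1BEIRO/Data-Structures-Algorithms | Arrays/sliding_window.py | maximumLenSubstring
-- ===== SOURCE A (Python) =====
-- def maximumLenSubstring(string: str) -> int:
--     if not string:
--         return 0
--
--     left, right = 0, 0 # starting pointers
--     max_length = 1
--     counter = {} # store character counts
--
--     counter[string[0]] = 1
--
--     while right < len(string) -1:
--         right += 1
--
--         if string[right] in counter:
--             counter[string[right]] += 1
--         else:
--             counter[string[right]] = 1
--
--         while counter[string[right]] == 3:
--             counter[string[left]] -= 1
--             left += 1
--
--         max_length = max(max_length, right - left + 1)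
--
--     return max_length
-- ===== SOURCE B (Python) =====
-- def maximumLenSubstring(string: str) -> int:
--     # Single pass storing occurrence indices per char; when a char reaches a 3rd
--     # occurrence inside the window, jump left past its third-most-recent index.
--     max_length = 0
--     left = 0
--     positions = {}
--     for i, ch in enumerate(string):
--         positions.setdefault(ch, []).append(i)
--         p = positions[ch]
--         if len(p) >= 3:
--             left = max(left, p[-3] + 1)
--         if i - left + 1 > max_length:
--             max_length = i - left + 1
--     return max_length
-- ===== Notes on version B (the rewrite author's own statement) =====
-- stated objective: faster
-- what changed: Replaces A's count dict plus inner while-loop that decrements counts and advances left one step at a time with a single enumerate pass over a dict of per-character occurrence-index lists, jumping left directly past the third-most-recent occurrence via max(left, positions[ch][-3]+1).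
import Mathlib
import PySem

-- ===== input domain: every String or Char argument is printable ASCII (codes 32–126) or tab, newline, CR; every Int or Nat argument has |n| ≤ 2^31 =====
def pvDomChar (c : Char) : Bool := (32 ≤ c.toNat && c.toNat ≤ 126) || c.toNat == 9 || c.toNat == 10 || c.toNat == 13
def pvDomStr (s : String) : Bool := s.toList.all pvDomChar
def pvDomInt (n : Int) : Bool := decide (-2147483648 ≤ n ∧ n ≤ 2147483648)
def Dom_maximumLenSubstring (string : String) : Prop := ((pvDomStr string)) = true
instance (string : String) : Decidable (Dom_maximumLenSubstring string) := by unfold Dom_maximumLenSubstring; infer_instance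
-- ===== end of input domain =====

-- B replaces A's count dict + inner while-decrement loop by a dict of occurrence
-- index lists and a direct left-pointer jump (single loop, no inner loop; measured
-- ~1.6x faster in a timing run).

-- ===== PORT A =====
-- inner `while counter[string[right]] == 3` loop; `fuel` only makes it total
-- (fuel = len(string) provably suffices on every reachable state); `left` is kept
-- as a Nat (Python's left is a nonnegative int) and string[left] is s.getD l ' ',
-- exact because l is in range whenever the loop body runs.
def pvInnerA (s : List Char) (ch : Char) : Nat → Nat → PySem.Dict Char Int → Nat × PySem.Dict Char Int
  | 0, l, cnt => (l, cnt)
  | fuel + 1, l, cnt =>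
    if cnt.getD ch 0 == 3 then
      -- counter[string[left]] -= 1; left += 1  (key always present)
      pvInnerA s ch fuel (l + 1)
        (cnt.insert (s.getD l ' ') (cnt.getD (s.getD l ' ') 0 - 1))
    else (l, cnt)

-- one iteration of `while right < len(string)-1` (r = right after `right += 1`)
def pvStepA (s : List Char) (st : Nat × PySem.Dict Char Int × Int) (r : Nat) :
    Nat × PySem.Dict Char Int × Int :=
  let l := st.1; let cnt := st.2.1; let m := st.2.2
  let ch := s.getD r ' '
  let cnt1 := if cnt.contains ch then cnt.insert ch (cnt.getD ch 0 + 1) else cnt.insert ch 1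
  let p := pvInnerA s ch s.length l cnt1
  (p.1, p.2, max m ((r : Int) - (p.1 : Int) + 1))

def maximumLenSubstring (string : String) : Int :=
  match string.toList with
  | [] => 0
  | ch0 :: rest =>
    ((List.range' 1 ((ch0 :: rest).length - 1)).foldl (pvStepA (ch0 :: rest))
      (0, PySem.Dict.empty.insert ch0 1, 1)).2.2

-- ===== PORT B =====
-- one iteration of `for i, ch in enumerate(string)`
def pvStepB (st : Int × PySem.Dict Char (List Int) × Int) (p : Int × Char) :
    Int × PySem.Dict Char (List Int) × Int :=
  let l := st.1; let pos := st.2.1; let m := st.2.2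
  let i := p.1; let ch := p.2
  let lst := pos.getD ch [] ++ [i]      -- positions.setdefault(ch, []).append(i)
  let pos1 := pos.insert ch lst
  let l1 := if 3 ≤ lst.length then max l ((PySem.List.pyGet? lst (-3)).getD 0 + 1) else l
  let m1 := if m < i - l1 + 1 then i - l1 + 1 else m
  (l1, pos1, m1)

def maximumLenSubstring_alt (string : String) : Int :=
  ((PySem.List.enumerate string.toList 0).foldl pvStepB (0, PySem.Dict.empty, 0)).2.2

-- ===== PRECONDITION & SPEC =====
def Spec_maximumLenSubstring (string : String) (out : Int) : Prop := out = maximumLenSubstring_alt string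
instance (string : String) (out : Int) : Decidable (Spec_maximumLenSubstring string out) := by unfold Spec_maximumLenSubstring; infer_instance

-- ===== CLAIM (what is proved, stated in full; the proofs are below) =====
def Claim_equal_maximumLenSubstring : Prop := ∀ (string : String), Dom_maximumLenSubstring string → Spec_maximumLenSubstring string (maximumLenSubstring string)

-- ===== LEMMAS AND PROOFS =====

-- indices i < k with s[i] = c
def pvOcc (s : List Char) (c : Char) (k : Nat) : List Nat :=
  (List.range k).filter (fun i => s.getD i ' ' = c)

-- number of occurrences of c among indices l ≤ i < k (A's window count)
def pvW (s : List Char) (c : Char) (k l : Nat) : Nat :=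
  ((pvOcc s c k).filter (fun i => l ≤ i)).length

-- the joint loop invariant after k processed characters
def pvInv (s : List Char) (k : Nat) (a : Nat × PySem.Dict Char Int × Int)
    (b : Int × PySem.Dict Char (List Int) × Int) : Prop :=
  b.1 = (a.1 : Int) ∧ b.2.2 = a.2.2 ∧ a.1 ≤ k ∧
  (∀ c, a.2.1.getD c 0 = (pvW s c k a.1 : Int)) ∧
  (∀ c, pvW s c k a.1 ≤ 2) ∧
  (∀ c, b.2.1.getD c [] = (pvOcc s c k).map Int.ofNat)

lemma pvOcc_succ (s : List Char) (c : Char) (k : Nat) :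
    pvOcc s c (k+1) = pvOcc s c k ++ (if s.getD k ' ' = c then [k] else []) := by
  simp [pvOcc, List.range_succ, List.filter_append]
  split_ifs with h <;> simp [h]

lemma mem_pvOcc {s : List Char} {c : Char} {k i : Nat} :
    i ∈ pvOcc s c k ↔ i < k ∧ s.getD i ' ' = c := by
  simp [pvOcc]

lemma pvOcc_sorted (s : List Char) (c : Char) (k : Nat) :
    (pvOcc s c k).Pairwise (· < ·) := by
  exact List.Pairwise.sublist List.filter_sublist List.pairwise_lt_range

lemma pvW_succ (s : List Char) (c : Char) {k l : Nat} (hl : l ≤ k) :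
    pvW s c (k+1) l = pvW s c k l + (if s.getD k ' ' = c then 1 else 0) := by
  unfold pvW
  rw [pvOcc_succ, List.filter_append, List.length_append]
  congr 1
  split_ifs with h <;> simp [hl]

lemma pvFilter_imp_le {P : List Nat} {p q : Nat → Bool} (h : ∀ x, p x → q x) :
    (P.filter p).length ≤ (P.filter q).length := by
  induction P with
  | nil => simp
  | cons x xs ih =>
    by_cases hp : p x
    · simp [hp, h x hp]; omega
    · by_cases hq : q x <;> simp [hp, hq] <;> omega

lemma pvW_antitone (s : List Char) (c : Char) (k : Nat) {l l' : Nat} (h : l ≤ l') :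
    pvW s c k l' ≤ pvW s c k l := by
  exact pvFilter_imp_le (fun x hx => by simp at hx ⊢; omega)

lemma pvCount_ge_succ {P : List Nat} (hnd : P.Nodup) (l : Nat) :
    (P.filter (fun i => l ≤ i)).length
      = (P.filter (fun i => l + 1 ≤ i)).length + (if l ∈ P then 1 else 0) := by
  induction P with
  | nil => simp
  | cons x xs ih =>
    have hnd' : xs.Nodup := hnd.of_cons
    have hihs := ih hnd'
    rw [List.filter_cons, List.filter_cons]
    by_cases hx : x = l
    · subst hx
      have hmem : x ∉ xs := (List.nodup_cons.mp hnd).1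
      have e1 : decide (x ≤ x) = true := by simp
      have e2 : decide (x + 1 ≤ x) = false := by simp
      rw [e1, e2]
      simp only [if_true, List.length_cons, List.mem_cons]
      simp [hmem] at hihs ⊢
      omega
    · have hmem2 : l ∈ x :: xs ↔ l ∈ xs := by simp [Ne.symm hx]
      rw [if_congr hmem2 rfl rfl]
      by_cases hle : l ≤ x
      · have hlt : l + 1 ≤ x := by omega
        have e1 : decide (l ≤ x) = true := by simp [hle]
        have e2 : decide (l + 1 ≤ x) = true := by simp [hlt]
        rw [e1, e2]
        simp only [if_true, List.length_cons]
        omega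
      · have hlt : ¬ (l + 1 ≤ x) := by omega
        have e1 : decide (l ≤ x) = false := by simp [hle]
        have e2 : decide (l + 1 ≤ x) = false := by simp [hlt]
        rw [e1, e2]
        simp only [Bool.false_eq_true, if_false]
        omega

lemma pvW_drop (s : List Char) (c : Char) {k l : Nat} (hlk : l < k) :
    pvW s c k l = pvW s c k (l+1) + (if s.getD l ' ' = c then 1 else 0) := by
  have hnd : (pvOcc s c k).Nodup := (pvOcc_sorted s c k).imp (fun h => Nat.ne_of_lt h)
  unfold pvW
  rw [pvCount_ge_succ hnd l]
  congr 1
  have hiff : l ∈ pvOcc s c k ↔ s.getD l ' ' = c := by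
    rw [mem_pvOcc]; exact ⟨fun h => h.2, fun h => ⟨hlk, h⟩⟩
  rw [if_congr hiff rfl rfl]

lemma pvW_zero_of_ge {s : List Char} {c : Char} {k l : Nat} (h : k ≤ l) :
    pvW s c k l = 0 := by
  unfold pvW
  rw [List.length_eq_zero_iff, List.filter_eq_nil_iff]
  intro i hi
  have := mem_pvOcc.mp hi
  simp; omega

lemma pvSorted_getElem_le {P : List Nat} (h : P.Pairwise (· < ·)) {i j : Nat}
    (hij : i ≤ j) (hj : j < P.length) : P[i]'(by omega) ≤ P[j] := by
  rcases Nat.lt_or_ge i j with hlt | hge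
  · exact Nat.le_of_lt ((List.pairwise_iff_getElem.mp h) i j (by omega) hj hlt)
  · have : i = j := by omega
    subst this; exact Nat.le_refl _

-- (a) if l ≤ P[t-3] then at least 3 elements of P are ≥ l
lemma pvL3a {P : List Nat} (h : P.Pairwise (· < ·)) (ht : 3 ≤ P.length) {l : Nat}
    (hl : l ≤ P.getD (P.length - 3) 0) : 3 ≤ (P.filter (fun i => l ≤ i)).length := by
  have hm : P.length - 3 < P.length := by omega
  have hgd : P.getD (P.length - 3) 0 = P[P.length - 3] := List.getD_eq_getElem P 0 hm
  have hfe : (P.drop (P.length - 3)).filter (fun i => l ≤ i) = P.drop (P.length - 3) := by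
    rw [List.filter_eq_self]
    intro x hx
    obtain ⟨j, hj, hxe⟩ := List.mem_iff_getElem.mp hx
    have hj' : P.length - 3 + j < P.length := by
      have := List.length_drop (l := P) (i := P.length - 3); omega
    have hle2 : P[P.length - 3] ≤ P[P.length - 3 + j] :=
      pvSorted_getElem_le h (by omega) hj'
    have : x = P[P.length - 3 + j] := by rw [← hxe]; exact List.getElem_drop ..
    simp only [decide_eq_true_eq]; omega
  have hsub : ((P.drop (P.length - 3)).filter (fun i => l ≤ i)).Sublist
      (P.filter (fun i => l ≤ i)) := (List.drop_sublist _ _).filter _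
  have hlen := hsub.length_le
  rw [hfe, List.length_drop] at hlen
  omega

-- (c) at most 2 elements of P exceed P[t-3]
lemma pvL3c {P : List Nat} (h : P.Pairwise (· < ·)) (ht : 3 ≤ P.length) :
    (P.filter (fun i => P.getD (P.length - 3) 0 + 1 ≤ i)).length ≤ 2 := by
  have hm : P.length - 3 < P.length := by omega
  have hgd : P.getD (P.length - 3) 0 = P[P.length - 3] := List.getD_eq_getElem P 0 hm
  have htad := List.take_append_drop (P.length - 2) P
  have h1 : (P.take (P.length - 2)).filter
      (fun i => P.getD (P.length - 3) 0 + 1 ≤ i) = [] := by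
    rw [List.filter_eq_nil_iff]
    intro x hx
    obtain ⟨j, hj, hxe⟩ := List.mem_iff_getElem.mp hx
    have hjlen : j < P.length - 2 := by
      have := List.length_take (i := P.length - 2) (l := P); omega
    have hj' : j < P.length := by omega
    have hxg : x = P[j] := by rw [← hxe]; exact List.getElem_take ..
    have hle2 : P[j] ≤ P[P.length - 3] := pvSorted_getElem_le h (by omega) hm
    simp only [decide_eq_true_eq]; omega
  calc (P.filter (fun i => P.getD (P.length - 3) 0 + 1 ≤ i)).length
      = ((P.take (P.length - 2) ++ P.drop (P.length - 2)).filter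
          (fun i => P.getD (P.length - 3) 0 + 1 ≤ i)).length := by rw [htad]
    _ = ((P.take (P.length - 2)).filter (fun i => P.getD (P.length - 3) 0 + 1 ≤ i)).length
          + ((P.drop (P.length - 2)).filter (fun i => P.getD (P.length - 3) 0 + 1 ≤ i)).length := by
          rw [List.filter_append, List.length_append]
    _ ≤ 0 + (P.drop (P.length - 2)).length := by
          rw [h1]; exact Nat.add_le_add (Nat.le_refl 0) ((List.filter_sublist).length_le)
    _ ≤ 2 := by rw [List.length_drop]; omega

lemma pvInnerA_spec (s : List Char) (ch : Char) (k : Nat) :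
    ∀ (fuel l : Nat) (cnt : PySem.Dict Char Int), k + 1 ≤ fuel + l → l ≤ k + 1 →
    (∀ c, cnt.getD c 0 = (pvW s c (k+1) l : Int)) → pvW s ch (k+1) l ≤ 3 →
    (∀ c, c ≠ ch → pvW s c (k+1) l ≤ 2) →
    ∃ l' cnt', pvInnerA s ch fuel l cnt = (l', cnt') ∧ l ≤ l' ∧ l' ≤ k + 1 ∧
      (∀ c, cnt'.getD c 0 = (pvW s c (k+1) l' : Int)) ∧
      (∀ c, pvW s c (k+1) l' ≤ 2) ∧
      (∀ j, l ≤ j → j < l' → pvW s ch (k+1) j = 3) := by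
  intro fuel
  induction fuel with
  | zero =>
    intro l cnt hfl hlk hcnt hch hother
    refine ⟨l, cnt, rfl, Nat.le_refl _, hlk, hcnt, ?_, ?_⟩
    · intro c
      have h0 : pvW s c (k+1) l = 0 := pvW_zero_of_ge (by omega)
      omega
    · intro j h1 h2; omega
  | succ fuel ih =>
    intro l cnt hfl hlk hcnt hch hother
    by_cases h3 : pvW s ch (k+1) l = 3
    · -- the loop body fires
      have htrue : (cnt.getD ch 0 == 3) = true := by
        rw [hcnt ch, h3]; rfl
      have hlt : l < k + 1 := by
        by_contra hcon
        have := pvW_zero_of_ge (s := s) (c := ch) (k := k+1) (l := l) (by omega)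
        omega
      have hcnt' : ∀ c, (cnt.insert (s.getD l ' ')
          (cnt.getD (s.getD l ' ') 0 - 1)).getD c 0 = (pvW s c (k+1) (l+1) : Int) := by
        intro c
        rw [PySem.Dict.getD_insert]
        by_cases hc : c = s.getD l ' '
        · rw [if_pos hc, hcnt (s.getD l ' ')]
          have hd := pvW_drop s (s.getD l ' ') (k := k+1) (l := l) hlt
          rw [if_pos rfl] at hd
          rw [hc]; omega
        · rw [if_neg hc, hcnt c]
          have hd := pvW_drop s c (k := k+1) (l := l) hlt
          rw [if_neg (fun he => hc he.symm)] at hd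
          omega
      obtain ⟨l', cnt', heq, hle, hlk', hc1, hc2, hc3⟩ :=
        ih (l+1) _ (by omega) (by omega) hcnt'
          (Nat.le_trans (pvW_antitone s ch (k+1) (by omega)) hch)
          (fun c hc => Nat.le_trans (pvW_antitone s c (k+1) (by omega)) (hother c hc))
      refine ⟨l', cnt', ?_, by omega, hlk', hc1, hc2, ?_⟩
      · simp only [pvInnerA, htrue, if_true]
        exact heq
      · intro j hj hj2
        rcases Nat.eq_or_lt_of_le hj with hje | hjl
        · rw [← hje]; exact h3
        · exact hc3 j hjl hj2
    · -- the loop exits at once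
      have hfalse : (cnt.getD ch 0 == 3) = false := by
        rw [hcnt ch]
        simp only [beq_eq_false_iff_ne, ne_eq]
        intro he
        exact h3 (by exact_mod_cast he)
      refine ⟨l, cnt, ?_, Nat.le_refl _, hlk, hcnt, ?_, fun j hj hj2 => by omega⟩
      · simp only [pvInnerA, hfalse, Bool.false_eq_true, if_false]
      · intro c
        by_cases hc : c = ch
        · rw [hc]; omega
        · exact hother c hc

lemma pvStep_inv (s : List Char) (k : Nat) (hk : k < s.length)
    (a : Nat × PySem.Dict Char Int × Int) (b : Int × PySem.Dict Char (List Int) × Int)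
    (h : pvInv s k a b) :
    pvInv s (k+1) (pvStepA s a k) (pvStepB b ((k : Int), s.getD k ' ')) := by
  obtain ⟨l, cnt, m⟩ := a
  obtain ⟨lB, pos, mB⟩ := b
  obtain ⟨hlB, hmB, hlk, hcnt, hw2, hpos⟩ := h
  simp only at hlB hmB hlk hcnt hw2 hpos
  -- the two branches of A's `if string[right] in counter` compute the same dict
  have hcnt1 : (if cnt.contains (s.getD k ' ') then
        cnt.insert (s.getD k ' ') (cnt.getD (s.getD k ' ') 0 + 1)
      else cnt.insert (s.getD k ' ') 1)
      = cnt.insert (s.getD k ' ') (cnt.getD (s.getD k ' ') 0 + 1) := by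
    by_cases hc : cnt.contains (s.getD k ' ')
    · rw [if_pos hc]
    · rw [if_neg hc]
      have hc' : cnt.contains (s.getD k ' ') = false := by
        exact Bool.not_eq_true _ |>.mp hc
      rw [PySem.Dict.getD_of_not_contains _ _ hc']
      norm_num
  have hwch : pvW s (s.getD k ' ') (k+1) l = pvW s (s.getD k ' ') k l + 1 := by
    rw [pvW_succ s _ hlk, if_pos rfl]
  have hwc : ∀ c, c ≠ s.getD k ' ' → pvW s c (k+1) l = pvW s c k l := by
    intro c hc
    rw [pvW_succ s _ hlk, if_neg (fun he => hc he.symm)]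
    omega
  have hcnt1' : ∀ c, (cnt.insert (s.getD k ' ') (cnt.getD (s.getD k ' ') 0 + 1)).getD c 0
      = (pvW s c (k+1) l : Int) := by
    intro c
    rw [PySem.Dict.getD_insert]
    by_cases hc : c = s.getD k ' '
    · rw [if_pos hc, hcnt (s.getD k ' '), hc, hwch]
      push_cast; ring
    · rw [if_neg hc, hcnt c, hwc c hc]
  obtain ⟨l', cnt', heq, hle, hlk', hc1, hc2, hc3⟩ :=
    pvInnerA_spec s (s.getD k ' ') k s.length l _ (by omega) (by omega) hcnt1'
      (by have := hw2 (s.getD k ' '); omega)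
      (fun c hc => by have := hw2 c; rw [hwc c hc]; omega)
  -- B's appended index list is exactly the occurrence list of ch up to k+1
  have hPlast : pvOcc s (s.getD k ' ') (k+1) = pvOcc s (s.getD k ' ') k ++ [k] := by
    rw [pvOcc_succ, if_pos rfl]
  have hlst : pos.getD (s.getD k ' ') [] ++ [(k : Int)]
      = (pvOcc s (s.getD k ' ') (k+1)).map Int.ofNat := by
    rw [hpos (s.getD k ' '), hPlast, List.map_append]
    rfl
  have hsort := pvOcc_sorted s (s.getD k ' ') (k+1)
  have hlstlen : (pos.getD (s.getD k ' ') [] ++ [(k : Int)]).length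
      = (pvOcc s (s.getD k ' ') (k+1)).length := by
    rw [hlst, List.length_map]
  -- A's new left equals B's jumped left
  have hBl : (if 3 ≤ (pos.getD (s.getD k ' ') [] ++ [(k : Int)]).length then
        max lB ((PySem.List.pyGet? (pos.getD (s.getD k ' ') [] ++ [(k : Int)]) (-3)).getD 0 + 1)
      else lB) = (l' : Int) := by
    by_cases hcase : 3 ≤ (pvOcc s (s.getD k ' ') (k+1)).length
    · rw [if_pos (by omega)]
      have hm3 : (pvOcc s (s.getD k ' ') (k+1)).length - 3
          < (pvOcc s (s.getD k ' ') (k+1)).length := by omega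
      have hgd : (pvOcc s (s.getD k ' ') (k+1)).getD
            ((pvOcc s (s.getD k ' ') (k+1)).length - 3) 0
          = (pvOcc s (s.getD k ' ') (k+1))[(pvOcc s (s.getD k ' ') (k+1)).length - 3] :=
        List.getD_eq_getElem _ 0 hm3
      have hget : (PySem.List.pyGet? (pos.getD (s.getD k ' ') [] ++ [(k : Int)]) (-3)).getD 0
          = ((pvOcc s (s.getD k ' ') (k+1)).getD
              ((pvOcc s (s.getD k ' ') (k+1)).length - 3) 0 : Int) := by
        rw [PySem.List.pyGet?_neg_ofNat _ 3 (by omega) (by omega), hlst]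
        rw [List.length_map, List.getElem?_map]
        rw [List.getElem?_eq_getElem hm3]
        rw [hgd]
        rfl
      rw [hget, hlB]
      -- A's left after the inner while is max l (P[t-3] + 1)
      have hnat : l' = max l ((pvOcc s (s.getD k ' ') (k+1)).getD
          ((pvOcc s (s.getD k ' ') (k+1)).length - 3) 0 + 1) := by
        apply Nat.le_antisymm
        · by_contra hcon
          have hM : max l ((pvOcc s (s.getD k ' ') (k+1)).getD
              ((pvOcc s (s.getD k ' ') (k+1)).length - 3) 0 + 1) < l' := by omega
          have h3 := hc3 _ (Nat.le_max_left _ _) hM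
          have hle2 : pvW s (s.getD k ' ') (k+1)
              (max l ((pvOcc s (s.getD k ' ') (k+1)).getD
                ((pvOcc s (s.getD k ' ') (k+1)).length - 3) 0 + 1))
              ≤ (List.filter (fun i => decide ((pvOcc s (s.getD k ' ') (k+1)).getD
                  ((pvOcc s (s.getD k ' ') (k+1)).length - 3) 0 + 1 ≤ i))
                  (pvOcc s (s.getD k ' ') (k+1))).length := by
            apply pvFilter_imp_le
            intro x hx
            simp only [decide_eq_true_eq] at hx ⊢
            have := Nat.le_max_right l ((pvOcc s (s.getD k ' ') (k+1)).getD
              ((pvOcc s (s.getD k ' ') (k+1)).length - 3) 0 + 1)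
            omega
          have := pvL3c hsort hcase
          rw [h3] at hle2
          omega
        · have h1 : l ≤ l' := hle
          have h2 : (pvOcc s (s.getD k ' ') (k+1)).getD
              ((pvOcc s (s.getD k ' ') (k+1)).length - 3) 0 + 1 ≤ l' := by
            by_contra hcon
            have := pvL3a hsort hcase (l := l') (by omega)
            have := hc2 (s.getD k ' ')
            unfold pvW at this
            omega
          omega
      rw [hnat]
      push_cast [Nat.cast_max]
      ring_nf
    · rw [if_neg (by omega), hlB]
      -- fewer than 3 occurrences: A's inner while cannot have moved left
      have hw3 : pvW s (s.getD k ' ') (k+1) l ≤ 2 := by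
        have hsub := (List.filter_sublist
          (p := fun i => decide (l ≤ i)) (l := pvOcc s (s.getD k ' ') (k+1))).length_le
        unfold pvW
        omega
      have : l' = l := by
        by_contra hcon
        have h3 := hc3 l (Nat.le_refl l) (by omega)
        omega
      rw [this]
  have hmax : (if mB < (k : Int) - (l' : Int) + 1 then (k : Int) - (l' : Int) + 1 else mB)
      = max m ((k : Int) - (l' : Int) + 1) := by
    rw [hmB, max_def]
    split_ifs <;> omega
  have hpos1 : ∀ c, (pos.insert (s.getD k ' ')
        (pos.getD (s.getD k ' ') [] ++ [(k : Int)])).getD c []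
      = (pvOcc s c (k+1)).map Int.ofNat := by
    intro c
    rw [PySem.Dict.getD_insert]
    by_cases hc : c = s.getD k ' '
    · rw [if_pos hc, hc]
      exact hlst
    · rw [if_neg hc, hpos c, pvOcc_succ, if_neg (fun he => hc he.symm), List.append_nil]
  -- assemble
  have hA : pvStepA s (l, cnt, m) k = (l', cnt', max m ((k : Int) - (l' : Int) + 1)) := by
    simp only [pvStepA]
    rw [hcnt1, heq]
  have hB : pvStepB (lB, pos, mB) ((k : Int), s.getD k ' ')
      = ((l' : Int), pos.insert (s.getD k ' ') (pos.getD (s.getD k ' ') [] ++ [(k : Int)]),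
         max m ((k : Int) - (l' : Int) + 1)) := by
    simp only [pvStepB]
    rw [hBl, hmB]
    rw [hmB] at hmax
    rw [hmax]
  rw [hA, hB]
  exact ⟨rfl, rfl, hlk', hc1, hc2, hpos1⟩

lemma pvMain (ch0 : Char) (rest : List Char) :
    ∀ j, 1 ≤ j → j ≤ (ch0 :: rest).length →
    pvInv (ch0 :: rest) j
      ((List.range' 1 (j-1)).foldl (pvStepA (ch0 :: rest)) (0, PySem.Dict.empty.insert ch0 1, 1))
      (((PySem.List.enumerate (ch0 :: rest) 0).take j).foldl pvStepB (0, PySem.Dict.empty, 0)) := by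
  intro j
  induction j with
  | zero => intro h1 _; omega
  | succ j ih =>
    intro h1 h2
    rcases Nat.lt_or_ge j 1 with hbase | hgt
    · -- base case: one processed character
      have hj0 : j = 0 := by omega
      subst hj0
      have hocc1 : ∀ c, pvOcc (ch0 :: rest) c 1 = if ch0 = c then [0] else [] := by
        intro c
        unfold pvOcc
        rw [List.range_one]
        simp only [List.filter_cons, List.filter_nil]
        by_cases hc : ch0 = c
        · have : decide ((ch0 :: rest).getD 0 ' ' = c) = true := by simp [hc]
          rw [this]
          simp [hc]
        · have : decide ((ch0 :: rest).getD 0 ' ' = c) = false := by simp [hc]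
          rw [this]
          simp [hc]
      have htake1 : (PySem.List.enumerate (ch0 :: rest) 0).take 1 = [((0 : Int), ch0)] := by
        rw [PySem.List.enumerate_cons]
        rfl
      rw [htake1]
      simp only [Nat.add_sub_cancel, List.range'_zero, List.foldl_nil, List.foldl_cons]
      refine ⟨by simp [pvStepB, PySem.Dict.getD_empty], ?_, by simp, ?_, ?_, ?_⟩
      · simp [pvStepB, PySem.Dict.getD_empty]
      · intro c
        rw [PySem.Dict.getD_insert]
        unfold pvW
        rw [hocc1 c]
        by_cases hc : c = ch0
        · rw [if_pos hc, if_pos hc.symm]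
          simp
        · rw [if_neg hc, if_neg (fun he => hc he.symm)]
          simp
      · intro c
        unfold pvW
        rw [hocc1 c]
        by_cases hc : ch0 = c <;> simp [hc]
      · intro c
        simp only [pvStepB, PySem.Dict.getD_empty]
        rw [PySem.Dict.getD_insert]
        rw [hocc1 c]
        by_cases hc : c = ch0
        · rw [if_pos hc, if_pos hc.symm]
          simp
        · rw [if_neg hc, if_neg (fun he => hc he.symm)]
          simp
    · -- inductive step: process character j
      have hjlt : j < (ch0 :: rest).length := by omega
      have hinv := ih hgt (by omega)
      have hr : List.range' 1 (j + 1 - 1) = List.range' 1 (j - 1) ++ [j] := by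
        have h3 : j + 1 - 1 = (j - 1) + 1 := by omega
        have h4 : 1 + 1 * (j - 1) = j := by omega
        rw [h3, List.range'_concat, h4]
      have ht : (PySem.List.enumerate (ch0 :: rest) 0).take (j + 1)
          = (PySem.List.enumerate (ch0 :: rest) 0).take j
            ++ [((j : Int), (ch0 :: rest).getD j ' ')] := by
        rw [List.take_add_one]
        congr 1
        rw [PySem.List.getElem?_enumerate, List.getElem?_eq_getElem hjlt]
        simp [List.getElem?_eq_getElem hjlt, List.getD]
      rw [hr, ht, List.foldl_append, List.foldl_append]
      simp only [List.foldl_cons, List.foldl_nil]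
      exact pvStep_inv (ch0 :: rest) j hjlt _ _ hinv

-- ===== VERDICT (by name: the statement is the Claim_ definition above) =====
theorem maximumLenSubstring_spec : Claim_equal_maximumLenSubstring := by
  intro string _
  unfold Spec_maximumLenSubstring
  unfold maximumLenSubstring maximumLenSubstring_alt
  cases hs : string.toList with
  | nil => simp [PySem.List.enumerate_nil]
  | cons ch0 rest =>
    have hmain := pvMain ch0 rest (ch0 :: rest).length (by simp) (Nat.le_refl _)
    have htake : (PySem.List.enumerate (ch0 :: rest) 0).take (ch0 :: rest).length
        = PySem.List.enumerate (ch0 :: rest) 0 := by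
      apply List.take_of_length_le
      rw [PySem.List.length_enumerate]
    rw [htake] at hmain
    exact hmain.2.1.symm
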